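-- pv_equiv track=rewrite | github.com/DaftCode101/Onion-De-Bruijn | ghproof.py | simplify_graph_edges
-- ===== SOURCE A (Python) =====
-- from collections import defaultdict
--
-- def simplify_graph_edges(edges: list[tuple[any, any]]) -> list[tuple[any, any]]:
--     adj = defaultdict(list)
--     in_degree, out_degree = defaultdict(int), defaultdict(int)
--     all_nodes = set()
--
--     for u, v in edges:
--         adj[u].append(v); out_degree[u] += 1; in_degree[v] += 1
--         all_nodes.add(u); all_nodes.add(v)
--
--     removable = {n for n in all_nodes if in_degree[n] == 1 and out_degree[n] == 1}
--     simplified_edges = []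
--
--     for u, v in edges:
--         if u in removable: continue
--         curr = v
--         visited = {u}
--         while curr in removable:
--             if curr in visited:
--                 curr = None
--                 break
--             visited.add(curr)
--             curr = adj[curr][0] if adj[curr] else None
--         if curr is not None:
--             simplified_edges.append((u, curr))
--     return simplified_edges
-- ===== SOURCE B (Python) =====
-- def simplify_graph_edges(edges: list[tuple[any, any]]) -> list[tuple[any, any]]:
--     succ = {}
--     indeg, outdeg = {}, {}
--     for u, v in edges:
--         succ.setdefault(u, v)
--         outdeg[u] = outdeg.get(u, 0) + 1
--         indeg[v] = indeg.get(v, 0) + 1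
--     removable = [n for n in succ if indeg.get(n, 0) == 1 and outdeg.get(n, 0) == 1]
--     rset = set(removable)
--     # reverse-chain propagation: compute the terminal of every removable node ONCE,
--     # by BFS backwards from the chain exits, instead of re-walking chains per edge.
--     preds = {}
--     term = {}
--     queue = []
--     for r in removable:
--         w = succ[r]
--         if w in rset:
--             preds.setdefault(w, []).append(r)
--         else:
--             term[r] = w
--             queue.append(r)
--     i = 0
--     while i < len(queue):
--         r = queue[i]
--         i += 1
--         for p in preds.get(r, []):
--             if p not in term:
--                 term[p] = term[r]
--                 queue.append(p)
--     out = []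
--     for u, v in edges:
--         if u in rset:
--             continue
--         if v not in rset:
--             out.append((u, v))
--         elif v in term:
--             out.append((u, term[v]))
--     return out
-- ===== Notes on version B (the rewrite author's own statement) =====
-- stated objective: alternative
-- what changed: B replaces A's per-edge forward chain walk with a one-shot reverse propagation: it builds a predecessor table over the removable nodes and BFS-propagates each chain's terminal backwards from the chain exits, so the final pass is a single dictionary lookup per edge instead of a walk with a fresh visited set.
import Mathlib
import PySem

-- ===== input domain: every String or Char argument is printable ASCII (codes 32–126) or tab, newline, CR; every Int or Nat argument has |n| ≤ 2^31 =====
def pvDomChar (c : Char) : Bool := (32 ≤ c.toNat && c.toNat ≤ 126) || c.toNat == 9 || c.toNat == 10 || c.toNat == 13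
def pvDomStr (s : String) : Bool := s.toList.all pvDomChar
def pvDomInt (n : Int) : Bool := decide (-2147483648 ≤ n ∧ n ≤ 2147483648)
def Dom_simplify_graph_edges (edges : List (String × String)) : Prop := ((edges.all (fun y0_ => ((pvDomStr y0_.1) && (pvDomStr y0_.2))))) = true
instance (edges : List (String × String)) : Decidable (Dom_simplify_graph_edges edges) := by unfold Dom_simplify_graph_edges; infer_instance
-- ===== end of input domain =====

-- B replaces A's per-edge forward chain walk (with a fresh visited set each time) by a one-shot
-- reverse BFS that propagates each removable chain's terminal backwards from the chain exits,
-- so the final pass is one dictionary lookup per edge: a different algorithm, same results.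

-- ===== PORT A =====

-- termination helper for A's while-loop: adding the (unvisited, removable) current node
-- to `visited` strictly shrinks the set of removable nodes not yet visited
theorem pvCountPLt {α : Type} (l : List α) (p q : α → Bool) (x : α) (hx : x ∈ l)
    (hpq : ∀ a ∈ l, p a = true → q a = true) (hpx : p x = false) (hqx : q x = true) :
    l.countP p < l.countP q := by
  induction l with
  | nil => cases hx
  | cons a t ih =>
    rcases List.mem_cons.1 hx with rfl | hxt
    · simp only [List.countP_cons, hpx, hqx]
      simpa using Nat.lt_succ_of_le
        (List.countP_mono_left (fun b hb => hpq b (List.mem_cons_of_mem _ hb)))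
    · have := ih hxt (fun b hb => hpq b (List.mem_cons_of_mem _ hb))
      simp only [List.countP_cons]
      by_cases hpa : p a = true
      · simp [hpa, hpq a List.mem_cons_self hpa]; omega
      · simp only [Bool.not_eq_true] at hpa; simp [hpa]
        split <;> omega

theorem pvChaseAMeasure (R visited : List String) (curr : String)
    (hR : curr ∈ R) (hv : curr ∉ visited) :
    (R.filter (fun n => !decide (n ∈ PySem.Set.add visited curr))).length <
      (R.filter (fun n => !decide (n ∈ visited))).length := by
  simp only [← List.countP_eq_length_filter]
  apply pvCountPLt R _ _ curr hR
  · intro a _ h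
    simp only [PySem.Set.mem_add, Bool.not_eq_eq_eq_not, Bool.not_true,
      decide_eq_false_iff_not, not_or] at h ⊢
    exact h.1
  · simp [PySem.Set.mem_add]
  · simp [hv]

-- while-loop of A: follow the unique successor while `curr` is removable, visited-set cycle check
def chaseA (R : PySem.Set String) (adj : PySem.Dict String (List String))
    (curr : String) (visited : PySem.Set String) : Option String :=
  if hR : curr ∈ R then
    if hv : curr ∈ visited then none
    else
      match adj.getD curr [] with
      | [] => none
      | nxt :: _ => chaseA R adj nxt (PySem.Set.add visited curr)
  else some curr
termination_by (R.filter (fun n => !decide (n ∈ visited))).length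
decreasing_by exact pvChaseAMeasure R visited curr hR hv

def simplify_graph_edges (edges : List (String × String)) : List (String × String) :=
  let st := edges.foldl
    (fun (s : PySem.Dict String (List String) ×
          (PySem.Dict String Int × (PySem.Dict String Int × PySem.Set String))) e =>
      (s.1.modify e.1 [] (· ++ [e.2]),
       (s.2.1.modify e.1 0 (· + 1),
        (s.2.2.1.modify e.2 0 (· + 1),
         PySem.Set.add (PySem.Set.add s.2.2.2 e.1) e.2))))
    (PySem.Dict.empty, (PySem.Dict.empty, (PySem.Dict.empty, PySem.Set.empty)))
  let adj := st.1
  let out_degree := st.2.1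
  let in_degree := st.2.2.1
  let all_nodes := st.2.2.2
  let removable : PySem.Set String :=
    PySem.Set.ofList (all_nodes.filter (fun n => in_degree.getD n 0 == 1 && out_degree.getD n 0 == 1))
  edges.foldl
    (fun acc e =>
      if e.1 ∈ removable then acc
      else
        match chaseA removable adj e.2 (PySem.Set.add PySem.Set.empty e.1) with
        | none => acc
        | some c => acc ++ [(e.1, c)])
    []

-- ===== PORT B =====

-- number of universe elements not yet keys of the dict: termination measure for the worklist
def pvNewKeys (U : List String) (d : PySem.Dict String String) : Nat :=
  (U.filter (fun x => !(d.contains x))).length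

-- body of B's inner `for p in preds.get(r, [])` loop
def pvStep (r : String) (st : PySem.Dict String String × List String) (p : String) :
    PySem.Dict String String × List String :=
  if st.1.contains p then st else (st.1.insert p (st.1.getD r ""), st.2 ++ [p])

theorem pvNewKeys_insert_lt (U : List String) (d : PySem.Dict String String)
    (p : String) (w : String) (hU : p ∈ U) (hc : d.contains p = false) :
    pvNewKeys U (d.insert p w) < pvNewKeys U d := by
  simp only [pvNewKeys, ← List.countP_eq_length_filter]
  apply pvCountPLt U _ _ p hU
  · intro a _ h
    rw [PySem.Dict.contains_insert] at h
    simp only [Bool.not_eq_eq_eq_not, Bool.not_true, Bool.or_eq_false_iff] at h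
    simp [h.2]
  · simp
  · simp [hc]

theorem pvStepMeasure (U : List String) (r : String) :
    ∀ (L : List String) (d : PySem.Dict String String) (acc : List String),
      (∀ p ∈ L, p ∈ U) →
      pvNewKeys U (L.foldl (pvStep r) (d, acc)).1 + (L.foldl (pvStep r) (d, acc)).2.length
        ≤ pvNewKeys U d + acc.length := by
  intro L
  induction L with
  | nil => intro d acc _; simp
  | cons p t ih =>
    intro d acc hU
    simp only [List.foldl_cons, pvStep]
    by_cases hc : d.contains p = true
    · rw [if_pos hc]
      exact ih d acc (fun q hq => hU q (List.mem_cons_of_mem _ hq))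
    · rw [if_neg hc]
      have h1 := pvNewKeys_insert_lt U d p (d.getD r "") (hU p List.mem_cons_self)
        (by simpa using hc)
      have h2 := ih (d.insert p (d.getD r "")) (acc ++ [p])
        (fun q hq => hU q (List.mem_cons_of_mem _ hq))
      simp only [List.length_append, List.length_cons, List.length_nil] at h2 ⊢
      omega

theorem pvGetDMemFlattenValues (d : PySem.Dict String (List String)) (k p : String)
    (h : p ∈ d.getD k []) : p ∈ d.values.flatten := by
  rw [PySem.Dict.getD_eq_get?_getD] at h
  cases hg : d.get? k with
  | none => rw [hg] at h; simp at h
  | some l =>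
    rw [hg] at h
    simp only [Option.getD_some] at h
    have hi := PySem.Dict.mem_items_of_get?_eq_some d hg
    exact List.mem_flatten.mpr ⟨l, by
      simp only [PySem.Dict.values]
      exact List.mem_map.mpr ⟨(k, l), hi, rfl⟩, h⟩

-- B's worklist loop: `queue` is the unprocessed suffix of the growing BFS order
def bfsB (preds : PySem.Dict String (List String)) (term : PySem.Dict String String)
    (queue : List String) : PySem.Dict String String :=
  match queue with
  | [] => term
  | r :: rest =>
    let st := (preds.getD r []).foldl (pvStep r) (term, rest)
    bfsB preds st.1 st.2
termination_by pvNewKeys (preds.values.flatten) term + queue.length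
decreasing_by
  have := pvStepMeasure (preds.values.flatten) r (preds.getD r []) term rest
    (fun p hp => pvGetDMemFlattenValues preds r p hp)
  simp only [List.length_cons]
  omega

def simplify_graph_edges_alt (edges : List (String × String)) : List (String × String) :=
  let st := edges.foldl
    (fun (s : PySem.Dict String String × (PySem.Dict String Int × PySem.Dict String Int)) e =>
      (s.1.setdefault e.1 e.2,
       (s.2.1.modify e.1 0 (· + 1),
        s.2.2.modify e.2 0 (· + 1))))
    (PySem.Dict.empty, (PySem.Dict.empty, PySem.Dict.empty))
  let succ := st.1
  let out_degree := st.2.1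
  let in_degree := st.2.2
  let removable : List String :=
    succ.keys.filter (fun n => in_degree.getD n 0 == 1 && out_degree.getD n 0 == 1)
  let rset : PySem.Set String := PySem.Set.ofList removable
  -- seed pass: predecessor lists among removable nodes; terminals of one-step exits
  let init := removable.foldl
    (fun (q : PySem.Dict String (List String) × (PySem.Dict String String × List String)) r =>
      let w := succ.getD r ""
      if w ∈ rset then (q.1.modify w [] (· ++ [r]), q.2)
      else (q.1, (q.2.1.insert r w, q.2.2 ++ [r])))
    (PySem.Dict.empty, (PySem.Dict.empty, []))
  let term := bfsB init.1 init.2.1 init.2.2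
  edges.foldl
    (fun acc e =>
      if e.1 ∈ rset then acc
      else if e.2 ∈ rset then
        match term.get? e.2 with
        | some w => acc ++ [(e.1, w)]
        | none => acc
      else acc ++ [(e.1, e.2)])
    []

-- ===== PRECONDITION & SPEC =====
def Spec_simplify_graph_edges (edges : List (String × String)) (out : List (String × String)) : Prop := out = simplify_graph_edges_alt edges
instance (edges : List (String × String)) (out : List (String × String)) : Decidable (Spec_simplify_graph_edges edges out) := by unfold Spec_simplify_graph_edges; infer_instance

-- ===== CLAIM (what is proved, stated in full; the proofs are below) =====
def Claim_equal_simplify_graph_edges : Prop := ∀ (edges : List (String × String)), Dom_simplify_graph_edges edges → Spec_simplify_graph_edges edges (simplify_graph_edges edges)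

-- ===== LEMMAS AND PROOFS =====

-- `pvReach f R v w`: following f from v stays inside R for m steps and first leaves R at w
def pvReach (f : String → String) (R : List String) (v w : String) : Prop :=
  ∃ m : Nat, (∀ i < m, f^[i] v ∈ R) ∧ f^[m] v = w ∧ w ∉ R

theorem pvReach_unique {f : String → String} {R : List String} {v w w' : String}
    (h : pvReach f R v w) (h' : pvReach f R v w') : w = w' := by
  obtain ⟨m, hin, hw, hout⟩ := h
  obtain ⟨m', hin', hw', hout'⟩ := h'
  rcases Nat.lt_trichotomy m m' with hlt | heq | hlt
  · exact absurd (hw ▸ hin' m hlt) hout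
  · rw [← hw, ← hw', heq]
  · exact absurd (hw' ▸ hin m' hlt) hout'

theorem pvReach_step {f : String → String} {R : List String} {v w : String}
    (hv : v ∈ R) (h : pvReach f R (f v) w) : pvReach f R v w := by
  obtain ⟨m, hin, hw, hout⟩ := h
  refine ⟨m + 1, ?_, ?_, hout⟩
  · intro i hi
    cases i with
    | zero => simpa using hv
    | succ j =>
      rw [Function.iterate_succ_apply]
      exact hin j (Nat.succ_lt_succ_iff.mp hi)
  · rw [Function.iterate_succ_apply]; exact hw

theorem pvReach_one {f : String → String} {R : List String} {v : String}
    (hv : v ∈ R) (hout : f v ∉ R) : pvReach f R v (f v) :=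
  ⟨1, fun i hi => by interval_cases i; simpa using hv, by simp, hout⟩

-- once the orbit repeats, every later iterate equals an iterate between the repeat points
theorem pvIterRepeat {α : Type} (f : α → α) (v : α) (i j : Nat) (hij : i < j)
    (h : f^[i] v = f^[j] v) :
    ∀ t, i ≤ t → ∃ s, i ≤ s ∧ s < j ∧ f^[t] v = f^[s] v := by
  intro t ht
  induction t, ht using Nat.le_induction with
  | base => exact ⟨i, le_refl i, hij, rfl⟩
  | succ t ht ih =>
    obtain ⟨s, his, hsj, hts⟩ := ih
    by_cases hsj' : s + 1 < j
    · exact ⟨s + 1, Nat.le_succ_of_le his, hsj', by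
        rw [Function.iterate_succ_apply', Function.iterate_succ_apply', hts]⟩
    · have hsj1 : s + 1 = j := by omega
      refine ⟨i, le_refl i, hij, ?_⟩
      calc f^[t+1] v = f (f^[t] v) := Function.iterate_succ_apply' f t v
        _ = f (f^[s] v) := by rw [hts]
        _ = f^[s+1] v := (Function.iterate_succ_apply' f s v).symm
        _ = f^[j] v := by rw [hsj1]
        _ = f^[i] v := h.symm

-- A's while-loop returns None whenever the whole orbit stays removable
theorem chaseA_none (R : List String) (adj : PySem.Dict String (List String))
    (succ : PySem.Dict String String)
    (hs : ∀ n ∈ R, adj.getD n [] = [succ.getD n ""]) :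
    ∀ (meas : Nat) (v : String) (visited : List String),
      (R.filter (fun n => !decide (n ∈ visited))).length ≤ meas →
      (∀ i, (fun x => succ.getD x "")^[i] v ∈ R) →
      chaseA R adj v visited = none := by
  intro meas
  induction meas with
  | zero =>
    intro v visited hle hall
    have h0 : v ∈ R := by simpa using hall 0
    rw [chaseA, dif_pos h0]
    by_cases hv : v ∈ visited
    · rw [dif_pos hv]
    · exfalso
      have : v ∈ R.filter (fun n => !decide (n ∈ visited)) :=
        List.mem_filter.mpr ⟨h0, by simp [hv]⟩
      have := List.length_pos_of_mem this
      omega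
  | succ meas ih =>
    intro v visited hle hall
    have h0 : v ∈ R := by simpa using hall 0
    rw [chaseA, dif_pos h0]
    by_cases hv : v ∈ visited
    · rw [dif_pos hv]
    · rw [dif_neg hv, hs v h0]
      have hlt := pvChaseAMeasure R visited v h0 hv
      exact ih (succ.getD v "") (PySem.Set.add visited v) (by omega)
        (fun i => by simpa [Function.iterate_succ_apply] using hall (i+1))

-- A's while-loop reaches the first non-removable iterate when the chain is duplicate-free
theorem chaseA_some (R : List String) (adj : PySem.Dict String (List String))
    (succ : PySem.Dict String String)
    (hs : ∀ n ∈ R, adj.getD n [] = [succ.getD n ""]) :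
    ∀ (m : Nat) (v : String) (visited : List String),
      (∀ i < m, (fun x => succ.getD x "")^[i] v ∈ R) →
      (fun x => succ.getD x "")^[m] v ∉ R →
      (∀ i j, i < j → j < m →
        (fun x => succ.getD x "")^[i] v ≠ (fun x => succ.getD x "")^[j] v) →
      (∀ i < m, (fun x => succ.getD x "")^[i] v ∉ visited) →
      chaseA R adj v visited = some ((fun x => succ.getD x "")^[m] v) := by
  intro m
  induction m with
  | zero =>
    intro v visited _ hout _ _
    simp only [Function.iterate_zero, id] at hout ⊢
    rw [chaseA, dif_neg hout]
  | succ m ih =>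
    intro v visited hin hout hdist hvis
    have h0 : v ∈ R := by simpa using hin 0 (Nat.succ_pos m)
    have hv : v ∉ visited := by simpa using hvis 0 (Nat.succ_pos m)
    rw [chaseA, dif_pos h0, dif_neg hv, hs v h0]
    have := ih (succ.getD v "") (PySem.Set.add visited v)
      (fun i hi => by
        simpa [Function.iterate_succ_apply] using hin (i+1) (Nat.succ_lt_succ hi))
      (by simpa [Function.iterate_succ_apply] using hout)
      (fun i j hij hjm => by
        have := hdist (i+1) (j+1) (Nat.succ_lt_succ hij) (Nat.succ_lt_succ hjm)
        simpa [Function.iterate_succ_apply] using this)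
      (fun i hi => by
        have h1 : (fun x => succ.getD x "")^[i+1] v ∉ visited :=
          hvis (i+1) (Nat.succ_lt_succ hi)
        have h2 : (fun x => succ.getD x "")^[i+1] v ≠ v := by
          intro h
          exact hdist 0 (i+1) (Nat.succ_pos i) (Nat.succ_lt_succ hi) (by
            simpa using h.symm)
        simp only [Function.iterate_succ_apply] at h1 h2 ⊢
        simp [PySem.Set.mem_add, h1, h2])
    exact this.trans (congrArg some (Function.iterate_succ_apply _ m v).symm)

-- B's inner fold: preservation of the worklist invariants plus what it adds.
-- The conclusion bundles: soundness of `term` entries, queue ⊆ dom term, the one-step-exit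
-- fact, the relaxed frontier invariant, coverage of L, and stability of the entry at r.
theorem pvProcessInv (R : List String) (succ : PySem.Dict String String) (r w0 : String)
    (hReach : pvReach (fun x => succ.getD x "") R r w0) :
    ∀ (L : List String) (T : PySem.Dict String String) (acc : List String),
      (∀ p ∈ L, p ∈ R ∧ succ.getD p "" = r) →
      T.get? r = some w0 →
      (∀ p w, T.get? p = some w → p ∈ R ∧ pvReach (fun x => succ.getD x "") R p w) →
      (∀ q ∈ acc, T.contains q = true) →
      (∀ p ∈ R, succ.getD p "" ∉ R → T.contains p = true) →
      (∀ p ∈ R, succ.getD p "" ∈ R → T.contains (succ.getD p "") = true →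
        (T.contains p = true ∨ succ.getD p "" ∈ acc ∨ succ.getD p "" = r)) →
      (let st := L.foldl (pvStep r) (T, acc)
       (∀ p w, st.1.get? p = some w → p ∈ R ∧ pvReach (fun x => succ.getD x "") R p w) ∧
       (∀ q ∈ st.2, st.1.contains q = true) ∧
       (∀ p ∈ R, succ.getD p "" ∉ R → st.1.contains p = true) ∧
       (∀ p ∈ R, succ.getD p "" ∈ R → st.1.contains (succ.getD p "") = true →
         (st.1.contains p = true ∨ succ.getD p "" ∈ st.2 ∨ succ.getD p "" = r)) ∧
       (∀ p ∈ L, st.1.contains p = true) ∧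
       (∀ q, T.contains q = true → st.1.contains q = true)) := by
  intro L
  induction L with
  | nil =>
    intro T acc _ _ H1 H2 H3 H4
    exact ⟨H1, H2, H3, H4, by simp, fun q hq => hq⟩
  | cons p t ih =>
    intro T acc hL hr H1 H2 H3 H4
    obtain ⟨hpR, hfp⟩ := hL p List.mem_cons_self
    simp only [List.foldl_cons, pvStep]
    by_cases hc : T.contains p = true
    · rw [if_pos hc]
      obtain ⟨C1, C2, C3, C4, C5, C7⟩ :=
        ih T acc (fun q hq => hL q (List.mem_cons_of_mem _ hq)) hr H1 H2 H3 H4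
      refine ⟨C1, C2, C3, C4, ?_, C7⟩
      intro q hq
      rcases List.mem_cons.mp hq with rfl | hq
      · exact C7 q hc
      · exact C5 q hq
    · rw [if_neg hc]
      have hw0 : T.getD r "" = w0 := by
        rw [PySem.Dict.getD_eq_get?_getD, hr]; rfl
      have hpr : p ≠ r := by
        intro h
        apply hc
        rw [h, PySem.Dict.contains_eq_isSome_get?, hr]; rfl
      have hr' : (T.insert p (T.getD r "")).get? r = some w0 :=
        (PySem.Dict.get?_insert_of_ne T (T.getD r "") hpr.symm).trans hr
      have H1' : ∀ q w, (T.insert p (T.getD r "")).get? q = some w →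
          q ∈ R ∧ pvReach (fun x => succ.getD x "") R q w := by
        intro q w hg
        by_cases hqp : q = p
        · subst hqp
          rw [PySem.Dict.get?_insert_self, hw0] at hg
          obtain rfl := Option.some.inj hg
          exact ⟨hpR, pvReach_step hpR (by rw [hfp]; exact hReach)⟩
        · rw [PySem.Dict.get?_insert_of_ne T (T.getD r "") hqp] at hg
          exact H1 q w hg
      have hmono : ∀ q, T.contains q = true → (T.insert p (T.getD r "")).contains q = true := by
        intro q hq
        rw [PySem.Dict.contains_insert, hq, Bool.or_true]
      have H2' : ∀ q ∈ acc ++ [p], (T.insert p (T.getD r "")).contains q = true := by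
        intro q hq
        rcases List.mem_append.mp hq with hq | hq
        · exact hmono q (H2 q hq)
        · obtain rfl := List.mem_singleton.mp hq
          exact PySem.Dict.contains_insert_self _ _ _
      have H3' : ∀ q ∈ R, succ.getD q "" ∉ R → (T.insert p (T.getD r "")).contains q = true :=
        fun q hq hf => hmono q (H3 q hq hf)
      have H4' : ∀ q ∈ R, succ.getD q "" ∈ R →
          (T.insert p (T.getD r "")).contains (succ.getD q "") = true →
          ((T.insert p (T.getD r "")).contains q = true ∨
            succ.getD q "" ∈ acc ++ [p] ∨ succ.getD q "" = r) := by
        intro q hq hf hcq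
        rw [PySem.Dict.contains_insert, Bool.or_eq_true] at hcq
        rcases hcq with hcq | hcq
        · exact Or.inr (Or.inl (List.mem_append.mpr (Or.inr (by
            simpa using (beq_iff_eq.mp hcq)))))
        · rcases H4 q hq hf hcq with h | h | h
          · exact Or.inl (hmono q h)
          · exact Or.inr (Or.inl (List.mem_append.mpr (Or.inl h)))
          · exact Or.inr (Or.inr h)
      obtain ⟨C1, C2, C3, C4, C5, C7⟩ :=
        ih (T.insert p (T.getD r "")) (acc ++ [p])
          (fun q hq => hL q (List.mem_cons_of_mem _ hq)) hr' H1' H2' H3' H4'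
      refine ⟨C1, C2, C3, C4, ?_, ?_⟩
      · intro q hq
        rcases List.mem_cons.mp hq with rfl | hq
        · exact C7 q (PySem.Dict.contains_insert_self _ _ _)
        · exact C5 q hq
      · exact fun q hq => C7 q (hmono q hq)

-- worklist loop correctness: from a state satisfying the invariants, the final dict is
-- sound and closed (every removable node whose successor's terminal is known is known)
theorem bfsB_spec (R : List String) (succ : PySem.Dict String String)
    (preds : PySem.Dict String (List String))
    (hpm : ∀ k p, p ∈ preds.getD k [] → p ∈ R ∧ succ.getD p "" = k)
    (hpc : ∀ p ∈ R, succ.getD p "" ∈ R → p ∈ preds.getD (succ.getD p "") []) :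
    ∀ (T : PySem.Dict String String) (Q : List String),
      (∀ p w, T.get? p = some w → p ∈ R ∧ pvReach (fun x => succ.getD x "") R p w) →
      (∀ q ∈ Q, T.contains q = true) →
      (∀ p ∈ R, succ.getD p "" ∉ R → T.contains p = true) →
      (∀ p ∈ R, succ.getD p "" ∈ R → T.contains (succ.getD p "") = true →
        (T.contains p = true ∨ succ.getD p "" ∈ Q)) →
      ((∀ p w, (bfsB preds T Q).get? p = some w →
          p ∈ R ∧ pvReach (fun x => succ.getD x "") R p w) ∧
       (∀ p ∈ R, succ.getD p "" ∉ R → (bfsB preds T Q).contains p = true) ∧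
       (∀ p ∈ R, succ.getD p "" ∈ R → (bfsB preds T Q).contains (succ.getD p "") = true →
          (bfsB preds T Q).contains p = true)) := by
  intro T Q
  induction T, Q using bfsB.induct preds with
  | case1 T =>
    intro H1 _ H3 H4
    rw [bfsB]
    exact ⟨H1, H3, fun p hp hf hc => (H4 p hp hf hc).resolve_right (by simp)⟩
  | case2 T r rest st ih =>
    intro H1 H2 H3 H4
    have hcr : T.contains r = true := H2 r List.mem_cons_self
    rw [PySem.Dict.contains_eq_isSome_get?] at hcr
    obtain ⟨w0, hr⟩ := Option.isSome_iff_exists.mp hcr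
    obtain ⟨_, hReach⟩ := H1 r w0 hr
    have H4' : ∀ p ∈ R, succ.getD p "" ∈ R → T.contains (succ.getD p "") = true →
        (T.contains p = true ∨ succ.getD p "" ∈ rest ∨ succ.getD p "" = r) := by
      intro p hp hf hc
      rcases H4 p hp hf hc with h | h
      · exact Or.inl h
      · rcases List.mem_cons.mp h with h | h
        · exact Or.inr (Or.inr h)
        · exact Or.inr (Or.inl h)
    obtain ⟨C1, C2, C3, C4, C5, _⟩ :=
      pvProcessInv R succ r w0 hReach (preds.getD r []) T rest
        (fun p hp => hpm r p hp) hr H1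
        (fun q hq => H2 q (List.mem_cons_of_mem _ hq)) H3 H4'
    rw [bfsB]
    apply ih C1 C2 C3
    intro p hp hf hc
    rcases C4 p hp hf hc with h | h | h
    · exact Or.inl h
    · exact Or.inr h
    · refine Or.inl (C5 p ?_)
      have := hpc p hp hf
      rw [h] at this
      exact this

-- closed dicts cover every node whose chain escapes
theorem pvClosureComplete (R : List String) (succ : PySem.Dict String String)
    (T : PySem.Dict String String)
    (h3 : ∀ p ∈ R, succ.getD p "" ∉ R → T.contains p = true)
    (h4 : ∀ p ∈ R, succ.getD p "" ∈ R → T.contains (succ.getD p "") = true →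
      T.contains p = true) :
    ∀ (m : Nat) (p : String), p ∈ R →
      (∀ i < m, (fun x => succ.getD x "")^[i] p ∈ R) →
      (fun x => succ.getD x "")^[m] p ∉ R →
      T.contains p = true := by
  intro m
  induction m with
  | zero =>
    intro p hp hin hout
    simp only [Function.iterate_zero, id] at hout
    exact absurd hp hout
  | succ m ih =>
    intro p hp hin hout
    by_cases hf : succ.getD p "" ∈ R
    · have hc := ih (succ.getD p "") hf
        (fun i hi => by
          simpa [Function.iterate_succ_apply] using hin (i+1) (Nat.succ_lt_succ hi))
        (by simpa [Function.iterate_succ_apply] using hout)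
      exact h4 p hp hf hc
    · exact h3 p hp hf

-- B's seed pass: characterization of the predecessor lists, the seeded terminals,
-- and the initial queue it builds
theorem pvSeedSpec (succ : PySem.Dict String String) (S : List String) :
    ∀ (l : List String), l.Nodup →
      ∀ (P : PySem.Dict String (List String)) (T : PySem.Dict String String) (Q : List String),
      (∀ r ∈ l, T.contains r = false) →
      (let F := l.foldl (fun q r =>
          if succ.getD r "" ∈ S then (q.1.modify (succ.getD r "") [] (· ++ [r]), q.2)
          else (q.1, (q.2.1.insert r (succ.getD r ""), q.2.2 ++ [r]))) (P, (T, Q))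
       (∀ k p, p ∈ F.1.getD k [] ↔
          p ∈ P.getD k [] ∨ (p ∈ l ∧ succ.getD p "" = k ∧ succ.getD p "" ∈ S)) ∧
       (∀ p w, F.2.1.get? p = some w ↔
          T.get? p = some w ∨ (p ∈ l ∧ succ.getD p "" ∉ S ∧ w = succ.getD p "")) ∧
       (F.2.2 = Q ++ l.filter (fun r => !decide (succ.getD r "" ∈ S)))) := by
  intro l
  induction l with
  | nil =>
    intro _ P T Q _
    refine ⟨?_, ?_, ?_⟩ <;> simp
  | cons r t ih =>
    intro hnd P T Q hfresh
    obtain ⟨hrt, hndt⟩ := List.nodup_cons.mp hnd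
    simp only [List.foldl_cons]
    by_cases hS : succ.getD r "" ∈ S
    · rw [if_pos hS]
      obtain ⟨h1, h2, h3⟩ := ih hndt (P.modify (succ.getD r "") [] (· ++ [r])) T Q
        (fun q hq => hfresh q (List.mem_cons_of_mem _ hq))
      refine ⟨?_, ?_, ?_⟩
      · intro k p
        rw [h1, PySem.Dict.getD_modify]
        by_cases hk : k = succ.getD r ""
        · subst hk
          rw [if_pos rfl]
          simp only [List.mem_append, List.mem_cons, List.not_mem_nil, or_false]
          constructor
          · rintro ((h | h) | ⟨hp, hfp, hfS⟩)
            · exact Or.inl h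
            · subst h; exact Or.inr ⟨Or.inl rfl, rfl, hS⟩
            · exact Or.inr ⟨Or.inr hp, hfp, hfS⟩
          · rintro (h | ⟨rfl | hp, hfp, hfS⟩)
            · exact Or.inl (Or.inl h)
            · exact Or.inl (Or.inr rfl)
            · exact Or.inr ⟨hp, hfp, hfS⟩
        · rw [if_neg hk]
          simp only [List.mem_cons]
          constructor
          · rintro (h | ⟨hp, hfp, hfS⟩)
            · exact Or.inl h
            · exact Or.inr ⟨Or.inr hp, hfp, hfS⟩
          · rintro (h | ⟨rfl | hp, hfp, hfS⟩)
            · exact Or.inl h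
            · exact absurd hfp.symm hk
            · exact Or.inr ⟨hp, hfp, hfS⟩
      · intro p w
        rw [h2]
        simp only [List.mem_cons]
        constructor
        · rintro (h | ⟨hp, hfS, hw⟩)
          · exact Or.inl h
          · exact Or.inr ⟨Or.inr hp, hfS, hw⟩
        · rintro (h | ⟨rfl | hp, hfS, hw⟩)
          · exact Or.inl h
          · exact absurd hS hfS
          · exact Or.inr ⟨hp, hfS, hw⟩
      · rw [h3, List.filter_cons]
        simp [hS]
    · rw [if_neg hS]
      have hTr : T.get? r = none := by
        have h := hfresh r List.mem_cons_self
        rw [PySem.Dict.contains_eq_isSome_get?] at h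
        exact Option.not_isSome_iff_eq_none.mp (by simp [h])
      have hfresh' : ∀ q ∈ t, (T.insert r (succ.getD r "")).contains q = false := by
        intro q hq
        rw [PySem.Dict.contains_insert]
        have hqr : (q == r) = false := by
          simp only [beq_eq_false_iff_ne]
          intro h; subst h; exact hrt hq
        rw [hqr, hfresh q (List.mem_cons_of_mem _ hq)]
        rfl
      obtain ⟨h1, h2, h3⟩ := ih hndt P (T.insert r (succ.getD r "")) (Q ++ [r]) hfresh'
      refine ⟨?_, ?_, ?_⟩
      · intro k p
        rw [h1]
        simp only [List.mem_cons]
        constructor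
        · rintro (h | ⟨hp, hfp, hfS⟩)
          · exact Or.inl h
          · exact Or.inr ⟨Or.inr hp, hfp, hfS⟩
        · rintro (h | ⟨rfl | hp, hfp, hfS⟩)
          · exact Or.inl h
          · exact absurd hfS hS
          · exact Or.inr ⟨hp, hfp, hfS⟩
      · intro p w
        rw [h2]
        by_cases hpr : p = r
        · subst hpr
          rw [PySem.Dict.get?_insert_self]
          simp only [List.mem_cons]
          constructor
          · rintro (h | ⟨hp, _, _⟩)
            · obtain rfl := Option.some.inj h
              exact Or.inr ⟨by simp, hS, rfl⟩
            · exact absurd hp hrt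
          · rintro (h | ⟨_, _, hw⟩)
            · rw [hTr] at h; cases h
            · exact Or.inl (by rw [hw])
        · rw [PySem.Dict.get?_insert_of_ne T _ hpr]
          simp only [List.mem_cons]
          constructor
          · rintro (h | ⟨hp, hfS2, hw⟩)
            · exact Or.inl h
            · exact Or.inr ⟨Or.inr hp, hfS2, hw⟩
          · rintro (h | ⟨h | hp, hfS2, hw⟩)
            · exact Or.inl h
            · exact absurd h hpr
            · exact Or.inr ⟨hp, hfS2, hw⟩
      · rw [h3, List.filter_cons]
        simp only [hS, decide_false, Bool.not_false, if_true]
        rw [List.append_assoc]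
        rfl

-- a 4-component accumulator loop is four independent loops
theorem foldA_eq (edges : List (String × String))
    (d1 : PySem.Dict String (List String)) (d2 d3 : PySem.Dict String Int)
    (s4 : PySem.Set String) :
    edges.foldl
      (fun (s : PySem.Dict String (List String) ×
            (PySem.Dict String Int × (PySem.Dict String Int × PySem.Set String))) e =>
        (s.1.modify e.1 [] (· ++ [e.2]),
         (s.2.1.modify e.1 0 (· + 1),
          (s.2.2.1.modify e.2 0 (· + 1),
           PySem.Set.add (PySem.Set.add s.2.2.2 e.1) e.2)))) (d1, (d2, (d3, s4)))
    = (edges.foldl (fun d e => d.modify e.1 [] (· ++ [e.2])) d1,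
       (edges.foldl (fun d e => d.modify e.1 0 (· + 1)) d2,
        (edges.foldl (fun d e => d.modify e.2 0 (· + 1)) d3,
         edges.foldl (fun s e => PySem.Set.add (PySem.Set.add s e.1) e.2) s4))) := by
  induction edges generalizing d1 d2 d3 s4 with
  | nil => rfl
  | cons e t ih => simp only [List.foldl_cons]; exact ih _ _ _ _

theorem foldB_eq (edges : List (String × String))
    (d1 : PySem.Dict String String) (d2 d3 : PySem.Dict String Int) :
    edges.foldl
      (fun (s : PySem.Dict String String ×
            (PySem.Dict String Int × PySem.Dict String Int)) e =>
        (s.1.setdefault e.1 e.2,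
         (s.2.1.modify e.1 0 (· + 1),
          s.2.2.modify e.2 0 (· + 1)))) (d1, (d2, d3))
    = (edges.foldl (fun d e => d.setdefault e.1 e.2) d1,
       (edges.foldl (fun d e => d.modify e.1 0 (· + 1)) d2,
        edges.foldl (fun d e => d.modify e.2 0 (· + 1)) d3)) := by
  induction edges generalizing d1 d2 d3 with
  | nil => rfl
  | cons e t ih => simp only [List.foldl_cons]; exact ih _ _ _

-- the two degree counters count first / second components
theorem getD_fst_count (edges : List (String × String)) (n : String) :
    (edges.foldl (fun d e => d.modify e.1 0 (· + 1)) PySem.Dict.empty).getD n 0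
      = ((edges.map Prod.fst).count n : Int) := by
  rw [← List.foldl_map (f := Prod.fst) (g := fun d x => PySem.Dict.modify d x 0 (· + 1)),
    PySem.Dict.getD_foldl_modify_add_one]
  simp

theorem getD_snd_count (edges : List (String × String)) (n : String) :
    (edges.foldl (fun d e => d.modify e.2 0 (· + 1)) PySem.Dict.empty).getD n 0
      = ((edges.map Prod.snd).count n : Int) := by
  rw [← List.foldl_map (f := Prod.snd) (g := fun d x => PySem.Dict.modify d x 0 (· + 1)),
    PySem.Dict.getD_foldl_modify_add_one]
  simp

-- A's adjacency list at a node is the ordered list of successors in `edges`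
theorem getD_adj (edges : List (String × String)) (n : String) :
    (edges.foldl (fun d e => d.modify e.1 [] (· ++ [e.2])) PySem.Dict.empty).getD n []
      = (edges.filter (fun p => p.1 == n)).map Prod.snd := by
  rw [PySem.Dict.getD_foldl_modify_append]
  simp

-- A's all_nodes set contains exactly the endpoints
theorem mem_nodes (edges : List (String × String)) :
    ∀ (s : PySem.Set String) (n : String),
      n ∈ edges.foldl (fun s e => PySem.Set.add (PySem.Set.add s e.1) e.2) s ↔
        n ∈ s ∨ ∃ e ∈ edges, n = e.1 ∨ n = e.2 := by
  induction edges with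
  | nil => simp
  | cons e t ih =>
    intro s n
    simp only [List.foldl_cons]
    rw [ih]
    simp only [PySem.Set.mem_add, List.mem_cons]
    constructor
    · rintro (((h | h) | h) | ⟨e', he', h⟩)
      · exact Or.inl h
      · exact Or.inr ⟨e, Or.inl rfl, Or.inl h⟩
      · exact Or.inr ⟨e, Or.inl rfl, Or.inr h⟩
      · exact Or.inr ⟨e', Or.inr he', h⟩
    · rintro (h | ⟨e', he' | he', h⟩)
      · exact Or.inl (Or.inl (Or.inl h))
      · subst he'
        rcases h with h | h
        · exact Or.inl (Or.inl (Or.inr h))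
        · exact Or.inl (Or.inr h)
      · exact Or.inr ⟨e', he', h⟩

-- B's succ dict holds the FIRST successor of each source node
theorem succ_get (edges : List (String × String)) :
    ∀ (d : PySem.Dict String String) (u : String),
      (edges.foldl (fun d e => d.setdefault e.1 e.2) d).get? u
        = (d.get? u).or (((edges.filter (fun p => p.1 == u)).map Prod.snd).head?) := by
  induction edges with
  | nil => simp
  | cons e t ih =>
    intro d u
    simp only [List.foldl_cons]
    rw [ih]
    by_cases he : e.1 = u
    · subst he
      have hf : (e :: t).filter (fun p => p.1 == e.1) = e :: t.filter (fun p => p.1 == e.1) := by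
        simp
      rw [hf]
      have hg := PySem.Dict.get?_setdefault_self d e.1 e.2
      rw [hg]
      cases hd : d.get? e.1 <;> simp
    · have hf : (e :: t).filter (fun p => p.1 == u) = t.filter (fun p => p.1 == u) := by
        simp [he]
      rw [hf]
      by_cases hc : d.contains e.1
      · rw [PySem.Dict.setdefault_of_contains d e.2 hc]
      · rw [PySem.Dict.setdefault_of_not_contains d e.2 (by simpa using hc),
          PySem.Dict.get?_insert_of_ne _ _ (Ne.symm he)]

-- B's succ dict keeps distinct keys
theorem succ_keys_nodup (edges : List (String × String)) :
    ∀ (d : PySem.Dict String String), d.keys.Nodup →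
      (edges.foldl (fun d e => d.setdefault e.1 e.2) d).keys.Nodup := by
  induction edges with
  | nil => intro d h; simpa using h
  | cons e t ih =>
    intro d h
    simp only [List.foldl_cons]
    apply ih
    by_cases hc : d.contains e.1
    · rw [PySem.Dict.setdefault_of_contains d e.2 hc]; exact h
    · rw [PySem.Dict.setdefault_of_not_contains d e.2 (by simpa using hc)]
      exact PySem.Dict.nodup_keys_insert _ _ _ h

-- the central correspondence: A's visited-set chase equals a lookup in B's terminal dict
theorem chase_main (Ra Rb : List String) (adj : PySem.Dict String (List String))
    (succ : PySem.Dict String String) (term : PySem.Dict String String)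
    (heq : ∀ x, x ∈ Ra ↔ x ∈ Rb)
    (hs : ∀ n ∈ Ra, adj.getD n [] = [succ.getD n ""])
    (hchar : ∀ p w, p ∈ Rb →
      (term.get? p = some w ↔ pvReach (fun x => succ.getD x "") Rb p w))
    (v : String) (visited : List String) (hvis : ∀ x ∈ visited, x ∉ Ra) :
    chaseA Ra adj v visited = (if v ∈ Rb then term.get? v else some v) := by
  by_cases hv : v ∈ Rb
  · rw [if_pos hv]
    by_cases hesc : ∃ m, (fun x => succ.getD x "")^[m] v ∉ Rb
    · classical
      have hout := Nat.find_spec hesc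
      have hin : ∀ i < Nat.find hesc, (fun x => succ.getD x "")^[i] v ∈ Rb :=
        fun i hi => not_not.mp (Nat.find_min hesc hi)
      have hdist : ∀ i j, i < j → j < Nat.find hesc →
          (fun x => succ.getD x "")^[i] v ≠ (fun x => succ.getD x "")^[j] v := by
        intro i j hij hjm h
        obtain ⟨s, _, hsj, hms⟩ := pvIterRepeat _ v i j hij h (Nat.find hesc) (by omega)
        exact hout (hms ▸ hin s (by omega))
      have hA := chaseA_some Ra adj succ hs (Nat.find hesc) v visited
        (fun i hi => (heq _).mpr (hin i hi))
        (fun h => hout ((heq _).mp h))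
        hdist
        (fun i hi h => hvis _ h ((heq _).mpr (hin i hi)))
      have hB : term.get? v = some ((fun x => succ.getD x "")^[Nat.find hesc] v) :=
        (hchar v _ hv).mpr ⟨Nat.find hesc, hin, rfl, hout⟩
      rw [hA, hB]
    · rw [not_exists] at hesc
      simp only [not_not] at hesc
      have hA := chaseA_none Ra adj succ hs
        ((Ra.filter (fun n => !decide (n ∈ visited))).length) v visited (le_refl _)
        (fun i => (heq _).mpr (hesc i))
      have hB : term.get? v = none := by
        cases hg : term.get? v with
        | none => rfl
        | some w =>
          obtain ⟨m, _, hw, hwout⟩ := (hchar v w hv).mp hg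
          exact absurd (hw ▸ hesc m) hwout
      rw [hA, hB]
  · have hva : v ∉ Ra := fun h => hv ((heq v).mp h)
    rw [if_neg hv, chaseA, dif_neg hva]

theorem simplify_graph_edges_agree (edges : List (String × String)) :
    simplify_graph_edges edges = simplify_graph_edges_alt edges := by
  simp only [simplify_graph_edges, simplify_graph_edges_alt, foldA_eq, foldB_eq]
  -- name the shared tables
  set adj := edges.foldl (fun d e => d.modify e.1 [] (· ++ [e.2])) PySem.Dict.empty with hadj
  set outd := edges.foldl (fun d e => d.modify e.1 0 (· + 1)) (PySem.Dict.empty : PySem.Dict String Int) with houtd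
  set ind := edges.foldl (fun d e => d.modify e.2 0 (· + 1)) (PySem.Dict.empty : PySem.Dict String Int) with hind
  set nodes := edges.foldl (fun s e => PySem.Set.add (PySem.Set.add s e.1) e.2) PySem.Set.empty with hnodes
  set succ := edges.foldl (fun d e => d.setdefault e.1 e.2) PySem.Dict.empty with hsucc
  set Ra := PySem.Set.ofList (List.filter (fun n => ind.getD n 0 == 1 && outd.getD n 0 == 1) nodes) with hRa
  set Rb := List.filter (fun n => ind.getD n 0 == 1 && outd.getD n 0 == 1) succ.keys with hRb
  have hndb : Rb.Nodup := by
    rw [hRb]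
    exact (succ_keys_nodup edges PySem.Dict.empty (by simp)).filter _
  rw [PySem.Set.ofList_eq_self_of_nodup Rb hndb]
  -- facts about the tables
  have hout : ∀ n, outd.getD n 0 = ((edges.map Prod.fst).count n : Int) := fun n =>
    getD_fst_count edges n
  have hinD : ∀ n, ind.getD n 0 = ((edges.map Prod.snd).count n : Int) := fun n =>
    getD_snd_count edges n
  have hadjF : ∀ n, adj.getD n [] = (edges.filter (fun p => p.1 == n)).map Prod.snd := fun n =>
    getD_adj edges n
  have hsuccG : ∀ u, succ.get? u = ((edges.filter (fun p => p.1 == u)).map Prod.snd).head? := by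
    intro u
    rw [hsucc, succ_get edges PySem.Dict.empty u]
    simp
  have hnodesM : ∀ n, n ∈ nodes ↔ ∃ e ∈ edges, n = e.1 ∨ n = e.2 := by
    intro n
    rw [hnodes, mem_nodes edges PySem.Set.empty n]
    simp [PySem.Set.empty]
  have hcnt : ∀ n, (edges.map Prod.fst).count n = (edges.filter (fun p => p.1 == n)).length := by
    intro n
    simp only [List.count, List.countP_map, ← List.countP_eq_length_filter]
    rfl
  have hkeysM : ∀ n, n ∈ succ.keys ↔ (edges.filter (fun p => p.1 == n)) ≠ [] := by
    intro n
    rw [← PySem.Dict.contains_iff_mem_keys, PySem.Dict.contains_eq_isSome_get?, hsuccG n]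
    rcases hf : edges.filter (fun p => p.1 == n) with _ | ⟨a, l⟩ <;> rw [hf] <;> simp
  have hdeg : ∀ n, ((ind.getD n 0 == 1 && outd.getD n 0 == 1) = true) ↔
      ((edges.map Prod.snd).count n = 1 ∧ (edges.map Prod.fst).count n = 1) := by
    intro n
    rw [Bool.and_eq_true, beq_iff_eq, beq_iff_eq, hout n, hinD n]
    constructor
    · rintro ⟨h1, h2⟩; exact ⟨by exact_mod_cast h1, by exact_mod_cast h2⟩
    · rintro ⟨h1, h2⟩; exact ⟨by exact_mod_cast h1, by exact_mod_cast h2⟩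
  have hEq : ∀ x, x ∈ Ra ↔ x ∈ Rb := by
    intro x
    rw [hRa, hRb, PySem.Set.mem_ofList]
    simp only [List.mem_filter]
    constructor
    · rintro ⟨_, hx⟩
      refine ⟨?_, hx⟩
      have hc := ((hdeg x).mp hx).2
      rw [hcnt x] at hc
      rw [hkeysM x]
      intro h
      rw [h] at hc
      simp at hc
    · rintro ⟨hk, hx⟩
      refine ⟨?_, hx⟩
      rw [hkeysM x] at hk
      obtain ⟨p, hpm⟩ := List.exists_mem_of_ne_nil _ hk
      rw [List.mem_filter] at hpm
      exact (hnodesM x).mpr ⟨p, hpm.1, Or.inl (beq_iff_eq.mp hpm.2).symm⟩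
  have hs : ∀ n ∈ Ra, adj.getD n [] = [succ.getD n ""] := by
    intro n hn
    rw [hRa, PySem.Set.mem_ofList, List.mem_filter] at hn
    have hc := ((hdeg n).mp hn.2).2
    rw [hcnt n] at hc
    obtain ⟨a, ha⟩ := List.length_eq_one_iff.mp hc
    rw [hadjF n, ha]
    have : succ.getD n "" = a.2 := by
      rw [PySem.Dict.getD_eq_get?_getD, hsuccG n, ha]
      rfl
    rw [this]
    rfl
  -- B's seed pass, characterized
  obtain ⟨hp1, hp2, hp3⟩ := pvSeedSpec succ Rb Rb hndb PySem.Dict.empty PySem.Dict.empty []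
    (fun r _ => PySem.Dict.contains_empty r)
  set F := Rb.foldl (fun q r =>
      if succ.getD r "" ∈ Rb then (q.1.modify (succ.getD r "") [] (· ++ [r]), q.2)
      else (q.1, (q.2.1.insert r (succ.getD r ""), q.2.2 ++ [r])))
    (PySem.Dict.empty, (PySem.Dict.empty, [])) with hF
  have hpm : ∀ k p, p ∈ F.1.getD k [] → p ∈ Rb ∧ succ.getD p "" = k := by
    intro k p hmem
    rcases (hp1 k p).mp hmem with h | ⟨a, b, _⟩
    · rw [PySem.Dict.getD_empty] at h; cases h
    · exact ⟨a, b⟩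
  have hpc : ∀ p ∈ Rb, succ.getD p "" ∈ Rb → p ∈ F.1.getD (succ.getD p "") [] :=
    fun p hmem hf => (hp1 _ p).mpr (Or.inr ⟨hmem, rfl, hf⟩)
  have hterm0 : ∀ p w, F.2.1.get? p = some w ↔
      (p ∈ Rb ∧ succ.getD p "" ∉ Rb ∧ w = succ.getD p "") := by
    intro p w
    rw [hp2, PySem.Dict.get?_empty]
    simp
  have hqueue0 : F.2.2 = Rb.filter (fun r => !decide (succ.getD r "" ∈ Rb)) := by
    rw [hp3]
    rfl
  -- worklist invariants at the initial state
  have I1 : ∀ p w, F.2.1.get? p = some w →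
      p ∈ Rb ∧ pvReach (fun x => succ.getD x "") Rb p w := by
    intro p w h
    obtain ⟨hmem, hf, hw⟩ := (hterm0 p w).mp h
    exact ⟨hmem, hw ▸ pvReach_one hmem hf⟩
  have I2 : ∀ q ∈ F.2.2, F.2.1.contains q = true := by
    intro q hq
    rw [hqueue0, List.mem_filter] at hq
    obtain ⟨hqR, hqf⟩ := hq
    have hg : F.2.1.get? q = some (succ.getD q "") :=
      (hterm0 _ _).mpr ⟨hqR, by simpa using hqf, rfl⟩
    rw [PySem.Dict.contains_eq_isSome_get?, hg]
    rfl
  have I3 : ∀ p ∈ Rb, succ.getD p "" ∉ Rb → F.2.1.contains p = true := by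
    intro p hmem hf
    have hg : F.2.1.get? p = some (succ.getD p "") := (hterm0 _ _).mpr ⟨hmem, hf, rfl⟩
    rw [PySem.Dict.contains_eq_isSome_get?, hg]
    rfl
  have I4 : ∀ p ∈ Rb, succ.getD p "" ∈ Rb → F.2.1.contains (succ.getD p "") = true →
      (F.2.1.contains p = true ∨ succ.getD p "" ∈ F.2.2) := by
    intro p _ hf hc
    rw [PySem.Dict.contains_eq_isSome_get?] at hc
    obtain ⟨w, hw⟩ := Option.isSome_iff_exists.mp hc
    obtain ⟨_, hff, _⟩ := (hterm0 _ _).mp hw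
    refine Or.inr ?_
    rw [hqueue0, List.mem_filter]
    exact ⟨hf, by simpa using hff⟩
  obtain ⟨hsound, h3', h4'⟩ := bfsB_spec Rb succ F.1 hpm hpc F.2.1 F.2.2 I1 I2 I3 I4
  have hchar : ∀ p w, p ∈ Rb →
      ((bfsB F.1 F.2.1 F.2.2).get? p = some w ↔
        pvReach (fun x => succ.getD x "") Rb p w) := by
    intro p w hmem
    constructor
    · exact fun h => (hsound p w h).2
    · intro hr
      obtain ⟨m, hin, hw, hwout⟩ := hr
      have hc := pvClosureComplete Rb succ _ h3' h4' m p hmem hin (by rw [hw]; exact hwout)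
      rw [PySem.Dict.contains_eq_isSome_get?] at hc
      obtain ⟨w', hw'⟩ := Option.isSome_iff_exists.mp hc
      obtain rfl : w' = w := pvReach_unique (hsound p w' hw').2 ⟨m, hin, hw, hwout⟩
      exact hw'
  -- per-edge agreement
  apply PySem.List.foldl_congr_mem
  intro acc e _
  by_cases hu : e.1 ∈ Rb
  · rw [if_pos ((hEq e.1).mpr hu), if_pos hu]
  · have hu' : e.1 ∉ Ra := fun h => hu ((hEq e.1).mp h)
    rw [if_neg hu', if_neg hu]
    rw [chase_main Ra Rb adj succ (bfsB F.1 F.2.1 F.2.2) hEq hs hchar e.2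
      (PySem.Set.add PySem.Set.empty e.1)
      (by intro x hx
          have hxe : x = e.1 := by
            simpa [PySem.Set.mem_add, PySem.Set.empty] using hx
          rw [hxe]
          exact hu')]
    by_cases hv2 : e.2 ∈ Rb
    · rw [if_pos hv2, if_pos hv2]
      cases hg : (bfsB F.1 F.2.1 F.2.2).get? e.2 <;> rfl
    · rw [if_neg hv2, if_neg hv2]

-- ===== VERDICT (by name: the statement is the Claim_ definition above) =====
theorem simplify_graph_edges_spec : Claim_equal_simplify_graph_edges := by
  intro edges _
  exact simplify_graph_edges_agree edges
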